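-- pv_equiv track=rewrite | github.com/chuuuuu/algorithm | kickstart/2021/a/c/sol3.py | set_safe
-- ===== SOURCE A (Python) =====
-- from collections import deque
--
-- def set_safe(node, cells):
--     R = len(cells)
--     C = len(cells[0])
--     x_start, y_start, h_start = node
--
--     ds = [[1, 0], [-1, 0], [0, 1], [0, -1]]
--     cells_q = deque()
--     cells_q.append([x_start, y_start])
--     ret = 0
--     while len(cells_q) != 0:
--         x, y = cells_q.popleft()
--         h = cells[x][y]
--         for d in ds:
--             dx, dy = d
--             x_new, y_new = x+dx, y+dy
--             if x_new < 0 or x_new >= R or y_new < 0 or y_new >= C: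
--                 continue
--
--             if cells[x_new][y_new]+1 < h:
--                 ret += h-1 - cells[x_new][y_new]
--                 cells[x_new][y_new] = h-1
--                 cells_q.append([x_new, y_new])
--
--     return ret
-- ===== SOURCE B (Python) =====
-- def set_safe(node, cells):
--     R = len(cells)
--     C = len(cells[0])
--     x0, y0, _h = node
--     orig = [row[:] for row in cells]
--     ret = 0
--     # seed: relax the start cell's four neighbours once
--     h = cells[x0][y0]
--     for nx, ny in ((x0 + 1, y0), (x0 - 1, y0), (x0, y0 + 1), (x0, y0 - 1)):
--         if 0 <= nx < R and 0 <= ny < C and cells[nx][ny] + 1 < h: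
--             ret += h - 1 - cells[nx][ny]
--             cells[nx][ny] = h - 1
--     # fixed point: sweep the whole grid, relaxing from every cell raised above
--     # its original height, until a complete pass changes nothing
--     changed = True
--     while changed:
--         changed = False
--         for x in range(R):
--             for y in range(C):
--                 if cells[x][y] > orig[x][y]:
--                     h = cells[x][y]
--                     for nx, ny in ((x + 1, y), (x - 1, y), (x, y + 1), (x, y - 1)):
--                         if 0 <= nx < R and 0 <= ny < C and cells[nx][ny] + 1 < h:
--                             ret += h - 1 - cells[nx][ny]
--                             cells[nx][ny] = h - 1
--                             changed = True
--     return ret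
-- ===== Notes on version B (the rewrite author's own statement) =====
-- stated objective: alternative
-- what changed: Removes the BFS worklist entirely: B snapshots the original grid, relaxes the start's four neighbours once, and then reaches the same fixed point by Bellman-Ford-style repeated full-grid sweeps (relaxing from every cell raised above its snapshot) until a complete pass changes nothing; no queue or frontier is maintained.
-- outside the precondition, e.g. on set_safe([0, 0, 5], [[1, 1], [2]]): A returns 0, B raises IndexError
import Mathlib
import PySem

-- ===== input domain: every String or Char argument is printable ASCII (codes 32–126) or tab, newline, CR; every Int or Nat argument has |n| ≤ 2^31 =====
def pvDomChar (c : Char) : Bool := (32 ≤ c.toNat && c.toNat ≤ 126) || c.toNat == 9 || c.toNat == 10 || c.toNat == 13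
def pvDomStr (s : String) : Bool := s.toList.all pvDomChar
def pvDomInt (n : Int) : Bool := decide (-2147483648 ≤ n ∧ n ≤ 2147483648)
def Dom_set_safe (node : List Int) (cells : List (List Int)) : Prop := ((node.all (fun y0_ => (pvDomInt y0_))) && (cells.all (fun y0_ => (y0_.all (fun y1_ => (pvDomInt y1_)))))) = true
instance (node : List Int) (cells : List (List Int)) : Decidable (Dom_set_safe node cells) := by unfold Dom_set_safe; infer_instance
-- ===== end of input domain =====

-- B removes A's BFS worklist: it snapshots the original grid, relaxes the start's four
-- neighbours once, then reaches the same fixed point by repeated full-grid sweeps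
-- (relaxing from every cell raised above its snapshot) until a pass changes nothing.
-- A mutates `cells` in place; B performs the same mutation; the theorem is about the
-- returned value.

-- ===== PORT A =====
-- cells[x][y] (Python negative indices wrap; none = IndexError)
def pvGetCell (cells : List (List Int)) (x y : Int) : Option Int :=
  match PySem.List.pyGet? cells x with
  | none => none
  | some row => PySem.List.pyGet? row y

-- cells[x][y] = v (only ever called with 0 ≤ x, 0 ≤ y in range)
def pvSetCell (cells : List (List Int)) (x y : Int) (v : Int) : List (List Int) :=
  cells.modify x.toNat (fun row => row.set y.toNat v)

-- body of A's `for d in ds:` loop; state = (cells_q, cells, ret)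
def pvRelaxA (R C x y h : Int) (st : List (Int × Int) × List (List Int) × Int)
    (d : Int × Int) : List (Int × Int) × List (List Int) × Int :=
  let xn := x + d.1
  let yn := y + d.2
  if xn < 0 ∨ R ≤ xn ∨ yn < 0 ∨ C ≤ yn then st
  else
    match pvGetCell st.2.1 xn yn with
    | none => st   -- Python raises IndexError here (ragged grid); excluded by Pre_
    | some v =>
      if v + 1 < h then (st.1 ++ [(xn, yn)], pvSetCell st.2.1 xn yn (h - 1), st.2.2 + (h - 1 - v))
      else st

-- fuel bound for A's while loop: an upper bound on all cells and the total headroom below it;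
-- each pop either shrinks the queue or strictly raises a cell, so 2*phi+1 pops suffice
def pvRowMax (m : Int) (row : List Int) : Int := row.foldl max m
def pvMax (cells : List (List Int)) : Int := cells.foldl pvRowMax 0
def pvPhi (M : Int) (cells : List (List Int)) : Int :=
  (cells.map (fun row => (row.map (fun v => M - v)).sum)).sum

-- A's `while len(cells_q) != 0:` loop
def pvLoopA (R C : Int) : Nat → List (Int × Int) → List (List Int) → Int → Int
  | _, [], _, ret => ret
  | 0, _ :: _, _, ret => ret   -- fuel exhausted; the fuel passed below is a proven bound, never reached
  | fuel + 1, p :: q, cells, ret =>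
    match pvGetCell cells p.1 p.2 with
    | none => ret   -- Python raises IndexError; excluded by Pre_
    | some h =>
      match [((1 : Int), (0 : Int)), (-1, 0), (0, 1), (0, -1)].foldl
          (pvRelaxA R C p.1 p.2 h) (q, cells, ret) with
      | (q', cells', ret') => pvLoopA R C fuel q' cells' ret'

def set_safe (node : List Int) (cells : List (List Int)) : Int :=
  match node, cells with
  | [x0, y0, _h], r0 :: rest =>
    pvLoopA ((r0 :: rest).length : Int) (r0.length : Int)
      (2 * pvPhi (pvMax (r0 :: rest)) (r0 :: rest) + 1).toNat [(x0, y0)] (r0 :: rest) 0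
  | _, _ => 0   -- len(node) ≠ 3 or cells = []: Python raises; excluded by Pre_

-- ===== PORT B =====
-- B-side copies of the cell accessors and of the fuel bound (kept separate from A's helpers)
def pvGetCellB (cells : List (List Int)) (x y : Int) : Option Int :=
  match PySem.List.pyGet? cells x with
  | none => none
  | some row => PySem.List.pyGet? row y

def pvSetCellB (cells : List (List Int)) (x y : Int) (v : Int) : List (List Int) :=
  cells.modify x.toNat (fun row => row.set y.toNat v)

def pvRowMaxB (m : Int) (row : List Int) : Int := row.foldl max m
def pvMaxB (cells : List (List Int)) : Int := cells.foldl pvRowMaxB 0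
def pvPhiB (M : Int) (cells : List (List Int)) : Int :=
  (cells.map (fun row => (row.map (fun v => M - v)).sum)).sum

-- body of B's seed loop over the start's four neighbours; state = (cells, ret)
def pvSeedB (R C h : Int) (st : List (List Int) × Int) (nb : Int × Int) :
    List (List Int) × Int :=
  if 0 ≤ nb.1 ∧ nb.1 < R ∧ 0 ≤ nb.2 ∧ nb.2 < C then
    match pvGetCellB st.1 nb.1 nb.2 with
    | none => st   -- Python raises IndexError here (ragged grid); excluded by Pre_
    | some v =>
      if v + 1 < h then (pvSetCellB st.1 nb.1 nb.2 (h - 1), st.2 + (h - 1 - v))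
      else st
  else st

-- body of B's innermost sweep loop; state = (cells, ret, changed)
def pvRelaxS (R C h : Int) (st : List (List Int) × Int × Bool) (nb : Int × Int) :
    List (List Int) × Int × Bool :=
  if 0 ≤ nb.1 ∧ nb.1 < R ∧ 0 ≤ nb.2 ∧ nb.2 < C then
    match pvGetCellB st.1 nb.1 nb.2 with
    | none => st   -- Python raises IndexError here (ragged grid); excluded by Pre_
    | some v =>
      if v + 1 < h then (pvSetCellB st.1 nb.1 nb.2 (h - 1), st.2.1 + (h - 1 - v), true)
      else st
  else st

-- one cell (x,y) of a sweep pass: relax from it if it sits above its snapshot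
def pvCellStep (R C : Int) (orig : List (List Int)) (st : List (List Int) × Int × Bool)
    (x y : Int) : List (List Int) × Int × Bool :=
  match pvGetCellB st.1 x y, pvGetCellB orig x y with
  | some cur, some o =>
    if o < cur then
      [(x + 1, y), (x - 1, y), (x, y + 1), (x, y - 1)].foldl (pvRelaxS R C cur) st
    else st
  | _, _ => st   -- Python raises IndexError (ragged grid); excluded by Pre_

-- one full pass: `for x in range(R): for y in range(C): …`
def pvPassB (R C : Int) (orig : List (List Int)) (st : List (List Int) × Int × Bool) :
    List (List Int) × Int × Bool :=
  (PySem.List.pyRange 0 R 1).foldl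
    (fun st x => (PySem.List.pyRange 0 C 1).foldl (fun st y => pvCellStep R C orig st x y) st) st

-- B's `while changed:` loop
def pvSweepB (R C : Int) (orig : List (List Int)) : Nat → List (List Int) → Int → Int
  | 0, _, ret => ret   -- fuel exhausted; the fuel passed below is a proven bound, never reached
  | fuel + 1, cells, ret =>
    match pvPassB R C orig (cells, ret, false) with
    | (cells', ret', changed) => if changed then pvSweepB R C orig fuel cells' ret' else ret'

def set_safe_alt (node : List Int) (cells : List (List Int)) : Int :=
  match cells with
  | [] => 0   -- cells = []: Python raises IndexError on cells[0]; excluded by Pre_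
  | r0 :: rest =>
    match node with   -- x0, y0, _h = node: len(node) ≠ 3 raises ValueError; excluded by Pre_
    | [] => 0
    | x0 :: node1 =>
      match node1 with
      | [] => 0
      | y0 :: node2 =>
        match node2 with
        | [] => 0
        | _h :: node3 =>
          match node3 with
          | _ :: _ => 0
          | [] =>
            let g := r0 :: rest
            let orig := g.map (fun row => row)   -- orig = [row[:] for row in cells]
            match pvGetCellB g x0 y0 with
            | none => 0   -- Python raises IndexError; excluded by Pre_
            | some h0 =>
              match [(x0 + 1, y0), (x0 - 1, y0), (x0, y0 + 1), (x0, y0 - 1)].foldl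
                  (pvSeedB (g.length : Int) (r0.length : Int) h0) (g, 0) with
              | (g1, r1) =>
                pvSweepB (g.length : Int) (r0.length : Int) orig
                  (pvPhiB (pvMaxB g) g + 1).toNat g1 r1

-- ===== PRECONDITION & SPEC =====
-- Pre_ excludes the inputs on which A raises (node not of length 3, empty grid, start index
-- out of wraparound range) and, to stay closed-form, every ragged grid with a row shorter
-- than row 0: there A raises IndexError whenever the flood reaches a missing entry, and on
-- those where A still returns, B's full-grid sweep raises IndexError itself.
-- Pre-side copy of the cell read (kept separate from the ports' helpers)
def pvGetCellP (cells : List (List Int)) (x y : Int) : Option Int :=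
  match PySem.List.pyGet? cells x with
  | none => none
  | some row => PySem.List.pyGet? row y

def Pre_set_safe (node : List Int) (cells : List (List Int)) : Prop :=
  node.length = 3 ∧ cells ≠ [] ∧
  (∀ row ∈ cells, cells.headI.length ≤ row.length) ∧
  (pvGetCellP cells node.headI node.tail.headI).isSome = true

instance (node : List Int) (cells : List (List Int)) : Decidable (Pre_set_safe node cells) := by
  unfold Pre_set_safe; infer_instance

def pvWitness_set_safe : List Int × List (List Int) := ([0, 0, 3], [[2, 0], [0, 0]])

def Spec_set_safe (node : List Int) (cells : List (List Int)) (out : Int) : Prop := out = set_safe_alt node cells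
instance (node : List Int) (cells : List (List Int)) (out : Int) : Decidable (Spec_set_safe node cells out) := by unfold Spec_set_safe; infer_instance

-- ===== CLAIM (what is proved, stated in full; the proofs are below) =====
def Claim_equal_set_safe : Prop := ∀ (node : List Int) (cells : List (List Int)), Dom_set_safe node cells → Pre_set_safe node cells → Spec_set_safe node cells (set_safe node cells)

-- ===== LEMMAS AND PROOFS =====

-- grid views used only by the proofs
def vN (g : List (List Int)) (i j : Nat) : Int := (g.getD i []).getD j 0
def vAt (g : List (List Int)) (t : Int × Int) : Int := vN g t.1.toNat t.2.toNat
def setP (g : List (List Int)) (i j : Nat) (v : Int) : List (List Int) :=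
  g.modify i (fun row => row.set j v)
def Inb (R C : Int) (t : Int × Int) : Prop := 0 ≤ t.1 ∧ t.1 < R ∧ 0 ≤ t.2 ∧ t.2 < C
def Nbs (t : Int × Int) : List (Int × Int) :=
  [(t.1 + 1, t.2), (t.1 - 1, t.2), (t.1, t.2 + 1), (t.1, t.2 - 1)]
def GOK (R C : Int) (g : List (List Int)) : Prop :=
  (g.length : Int) = R ∧ ∀ row ∈ g, C ≤ (row.length : Int)
def Shp (g g' : List (List Int)) : Prop :=
  g.length = g'.length ∧ ∀ i : Nat, (g.getD i []).length = (g'.getD i []).length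
def PLe (g g' : List (List Int)) : Prop := ∀ i j : Nat, vN g i j ≤ vN g' i j
def SumG (g : List (List Int)) : Int := (g.map (fun row => row.sum)).sum
def pvLe (M : Int) (c : List (List Int)) : Prop := ∀ row ∈ c, ∀ v ∈ row, v ≤ M
def CellOK (R C : Int) (g : List (List Int)) (t : Int × Int) : Prop :=
  ∀ n ∈ Nbs t, Inb R C n → vAt g t - 1 ≤ vAt g n
def RCk (R C : Int) (O g : List (List Int)) : Prop :=
  ∀ t : Int × Int, Inb R C t → vAt O t < vAt g t → CellOK R C g t

lemma shp_refl (g : List (List Int)) : Shp g g := ⟨rfl, fun _ => rfl⟩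
lemma shp_trans {a b c : List (List Int)} (h1 : Shp a b) (h2 : Shp b c) : Shp a c :=
  ⟨h1.1.trans h2.1, fun i => (h1.2 i).trans (h2.2 i)⟩
lemma shp_symm {a b : List (List Int)} (h : Shp a b) : Shp b a :=
  ⟨h.1.symm, fun i => (h.2 i).symm⟩
lemma ple_refl (g : List (List Int)) : PLe g g := fun _ _ => le_rfl
lemma ple_trans {a b c : List (List Int)} (h1 : PLe a b) (h2 : PLe b c) : PLe a c :=
  fun i j => (h1 i j).trans (h2 i j)

lemma length_setP (g : List (List Int)) (i j : Nat) (v : Int) :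
    (setP g i j v).length = g.length := by simp [setP]

lemma row_setP (g : List (List Int)) (i j : Nat) (v : Int) (i' : Nat) :
    (setP g i j v).getD i' [] = if i' = i then (g.getD i []).set j v else g.getD i' [] := by
  unfold setP
  rw [List.getD_eq_getElem?_getD, List.getElem?_modify]
  by_cases hii : i' = i
  · subst hii
    rw [if_pos rfl]
    rcases hg : getElem? g i' with _ | row
    · have : g.length ≤ i' := by
        by_contra hcon
        rw [List.getElem?_eq_getElem (by omega)] at hg; cases hg
      simp [List.getD_eq_getElem?_getD, List.getElem?_eq_none this]
    · simp [hg, List.getD_eq_getElem?_getD]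
  · rw [if_neg hii]
    rcases hg : getElem? g i' with _ | row
    · simp [hg, List.getD_eq_getElem?_getD]
    · simp [hg, List.getD_eq_getElem?_getD, Ne.symm hii]

lemma vN_setP_ne (g : List (List Int)) (i j : Nat) (v : Int) (i' j' : Nat)
    (h : ¬(i' = i ∧ j' = j)) : vN (setP g i j v) i' j' = vN g i' j' := by
  unfold vN
  rw [row_setP]
  by_cases hii : i' = i
  · subst hii
    have hjj : j' ≠ j := fun hc => h ⟨rfl, hc⟩
    rw [if_pos rfl, List.getD_eq_getElem?_getD, List.getD_eq_getElem?_getD,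
      List.getElem?_set_ne (Ne.symm hjj), ← List.getD_eq_getElem?_getD, ← List.getD_eq_getElem?_getD]
  · rw [if_neg hii]

lemma vN_setP_self (g : List (List Int)) (i j : Nat) (v : Int)
    (hj : j < (g.getD i []).length) : vN (setP g i j v) i j = v := by
  unfold vN
  rw [row_setP, if_pos rfl, List.getD_eq_getElem?_getD,
    List.getElem?_set_self (by simpa using hj)]
  simp

lemma shp_setP (g : List (List Int)) (i j : Nat) (v : Int) : Shp g (setP g i j v) := by
  refine ⟨(length_setP g i j v).symm, fun i' => ?_⟩
  rw [row_setP]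
  by_cases hii : i' = i
  · subst hii; simp
  · rw [if_neg hii]

lemma gok_setP (R C : Int) (g : List (List Int)) (i j : Nat) (v : Int)
    (h : GOK R C g) : GOK R C (setP g i j v) := by
  obtain ⟨hlen, hrows⟩ := h
  refine ⟨by rw [length_setP]; exact hlen, ?_⟩
  intro row hrow
  unfold setP at hrow
  obtain ⟨k, hk⟩ := List.mem_iff_getElem?.mp hrow
  rw [List.getElem?_modify] at hk
  rcases hg : getElem? g k with _ | r0 <;> rw [hg] at hk
  · cases hk
  · simp only [Option.map_eq_map, Option.map_some, Option.some_inj] at hk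
    by_cases hik : i = k
    · rw [← hk, if_pos hik]
      simpa using hrows r0 (List.mem_of_getElem? hg)
    · rw [← hk, if_neg hik]
      exact hrows r0 (List.mem_of_getElem? hg)

lemma pvLe_setP (M : Int) (g : List (List Int)) (i j : Nat) (v : Int)
    (h : pvLe M g) (hv : v ≤ M) : pvLe M (setP g i j v) := by
  intro row hrow u hu
  unfold setP at hrow
  obtain ⟨k, hk⟩ := List.mem_iff_getElem?.mp hrow
  rw [List.getElem?_modify] at hk
  rcases hg : getElem? g k with _ | r0 <;> rw [hg] at hk
  · cases hk
  · simp only [Option.map_eq_map, Option.map_some, Option.some_inj] at hk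
    by_cases hik : i = k
    · rw [← hk, if_pos hik] at hu
      rcases List.mem_or_eq_of_mem_set hu with hu' | rfl
      · exact h r0 (List.mem_of_getElem? hg) u hu'
      · exact hv
    · rw [← hk, if_neg hik] at hu
      exact h r0 (List.mem_of_getElem? hg) u hu

lemma sum_set_row : ∀ (l : List Int) (j : Nat), j < l.length → ∀ (x : Int),
    (l.set j x).sum = l.sum - l.getD j 0 + x := by
  intro l
  induction l with
  | nil => intro j hj; simp at hj
  | cons a l ih =>
    intro j hj x
    cases j with
    | zero => simp [List.set_cons_zero]; ring
    | succ j =>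
      rw [List.set_cons_succ]
      simp only [List.sum_cons, List.getD_cons_succ]
      rw [ih j (by simpa using hj) x]
      ring

lemma sum_map_modify (g : List Int → Int) : ∀ (c : List (List Int)) (i : Nat), i < c.length →
    ∀ (f : List Int → List Int),
    ((c.modify i f).map g).sum = (c.map g).sum - g (c.getD i []) + g (f (c.getD i [])) := by
  intro c
  induction c with
  | nil => intro i hi; simp at hi
  | cons a c ih =>
    intro i hi f
    cases i with
    | zero => simp [List.modify_cons]; ring
    | succ i =>
      rw [List.modify_cons]
      simp only [Nat.succ_ne_zero, if_false, Nat.add_sub_cancel, List.map_cons,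
        List.sum_cons, List.getD_cons_succ]
      rw [ih i (by simpa using hi) f]
      ring

lemma sumG_setP (g : List (List Int)) (i j : Nat) (v : Int)
    (hi : i < g.length) (hj : j < (g.getD i []).length) :
    SumG (setP g i j v) = SumG g - vN g i j + v := by
  unfold SumG setP vN
  rw [sum_map_modify _ g i hi, sum_set_row _ j hj v]
  ring

lemma phi_setP (M : Int) (g : List (List Int)) (i j : Nat) (v : Int)
    (hi : i < g.length) (hj : j < (g.getD i []).length) :
    pvPhi M (setP g i j v) = pvPhi M g - (v - vN g i j) := by
  unfold pvPhi setP vN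
  rw [sum_map_modify _ g i hi]
  have hmap : (((g.getD i []).set j v).map (fun u => M - u))
      = ((g.getD i []).map (fun u => M - u)).set j (M - v) := by
    rw [List.map_set]
  have hget : ((g.getD i []).map (fun u => M - u)).getD j 0 = M - (g.getD i []).getD j 0 := by
    rw [List.getD_eq_getElem?_getD, List.getElem?_map, List.getElem?_eq_getElem hj,
      List.getD_eq_getElem _ _ hj]
    simp
  rw [hmap, sum_set_row _ j (by simpa using hj) _, hget]
  ring

lemma pvPhi_nonneg (M : Int) (c : List (List Int)) (h : pvLe M c) : 0 ≤ pvPhi M c := by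
  unfold pvPhi
  apply List.sum_nonneg
  intro x hx
  obtain ⟨row, hrow, rfl⟩ := List.mem_map.mp hx
  apply List.sum_nonneg
  intro y hy
  obtain ⟨v, hvr, rfl⟩ := List.mem_map.mp hy
  have := h row hrow v hvr
  omega

lemma init_le_rowMax : ∀ (row : List Int) (m : Int), m ≤ pvRowMax m row := by
  intro row
  induction row with
  | nil => intro m; simp [pvRowMax]
  | cons a row ih =>
    intro m
    calc m ≤ max m a := le_max_left _ _
    _ ≤ pvRowMax (max m a) row := ih _
    _ = pvRowMax m (a :: row) := rfl

lemma mem_le_rowMax : ∀ (row : List Int) (m v : Int), v ∈ row → v ≤ pvRowMax m row := by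
  intro row
  induction row with
  | nil => intro m v hv; cases hv
  | cons a row ih =>
    intro m v hv
    rcases List.mem_cons.mp hv with rfl | hv
    · calc v ≤ max m v := le_max_right _ _
      _ ≤ pvRowMax (max m v) row := init_le_rowMax _ _
      _ = pvRowMax m (v :: row) := rfl
    · exact ih _ v hv

lemma init_le_foldMax : ∀ (c : List (List Int)) (m : Int), m ≤ c.foldl pvRowMax m := by
  intro c
  induction c with
  | nil => intro m; simp
  | cons r c ih => exact fun m => le_trans (init_le_rowMax r m) (ih _)

lemma pvLe_max (c : List (List Int)) : pvLe (pvMax c) c := by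
  suffices h : ∀ (c : List (List Int)) (m : Int) (row : List Int), row ∈ c → ∀ v ∈ row,
      v ≤ c.foldl pvRowMax m by
    exact fun row hr v hv => h c 0 row hr v hv
  intro c
  induction c with
  | nil => intro m row hr; cases hr
  | cons r0 c ih =>
    intro m row hr v hv
    rcases List.mem_cons.mp hr with rfl | hr
    · exact le_trans (mem_le_rowMax _ _ _ hv) (init_le_foldMax c _)
    · exact ih _ row hr v hv

lemma pvLe_of_get (M : Int) (c : List (List Int)) (a b h : Int)
    (hle : pvLe M c) (hg : pvGetCell c a b = some h) : h ≤ M := by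
  unfold pvGetCell at hg
  rcases hr : PySem.List.pyGet? c a with _ | row
  · rw [hr] at hg; cases hg
  · rw [hr] at hg
    exact hle row (PySem.List.mem_of_pyGet?_eq_some _ hr) h (PySem.List.mem_of_pyGet?_eq_some _ hg)

-- reading an in-bounds cell under the shape hypothesis
lemma row_lt_of_gok {R C : Int} {g : List (List Int)} (hg : GOK R C g) {t : Int × Int}
    (ht : Inb R C t) : t.1.toNat < g.length ∧ t.2.toNat < (g.getD t.1.toNat []).length := by
  obtain ⟨hlen, hrows⟩ := hg
  obtain ⟨h1, h2, h3, h4⟩ := ht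
  have hi : t.1.toNat < g.length := by omega
  refine ⟨hi, ?_⟩
  have hmem : g.getD t.1.toNat [] ∈ g := by
    rw [List.getD_eq_getElem _ _ hi]; exact List.getElem_mem _
  have := hrows _ hmem
  omega

lemma get_vAt {R C : Int} {g : List (List Int)} (hg : GOK R C g) {t : Int × Int}
    (ht : Inb R C t) : pvGetCell g t.1 t.2 = some (vAt g t) := by
  obtain ⟨hi, hj⟩ := row_lt_of_gok hg ht
  have hrow : g.getD t.1.toNat [] = g[t.1.toNat] := List.getD_eq_getElem _ _ hi
  unfold pvGetCell vAt vN
  rw [PySem.List.pyGet?_of_nonneg g ht.1, List.getElem?_eq_getElem hi]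
  show PySem.List.pyGet? g[t.1.toNat] t.2 = some ((g.getD t.1.toNat []).getD t.2.toNat 0)
  rw [hrow] at hj ⊢
  rw [PySem.List.pyGet?_of_nonneg _ ht.2.2.1, List.getElem?_eq_getElem hj,
    List.getD_eq_getElem _ _ hj]

lemma vAt_le_of_pvLe {R C M : Int} {g : List (List Int)} (hg : GOK R C g)
    (hle : pvLe M g) {t : Int × Int} (ht : Inb R C t) : vAt g t ≤ M := by
  obtain ⟨hi, hj⟩ := row_lt_of_gok hg ht
  unfold vAt vN
  refine hle (g.getD t.1.toNat []) ?_ ((g.getD t.1.toNat []).getD t.2.toNat 0) ?_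
  · rw [List.getD_eq_getElem _ _ hi]; exact List.getElem_mem _
  · rw [List.getD_eq_getElem _ _ hj]; exact List.getElem_mem _

-- the B-side and Pre-side helper copies are definitionally A's helpers
lemma pvGetCellP_eq : pvGetCellP = pvGetCell := rfl
lemma pvGetCellB_eq : pvGetCellB = pvGetCell := rfl
lemma pvMaxB_eq : pvMaxB = pvMax := rfl
lemma pvPhiB_eq : pvPhiB = pvPhi := rfl

-- canonical relaxation step shared by the analyses of both ports
def rlx (R C h : Int) (st : List (List Int) × Int) (t : Int × Int) :
    List (List Int) × Int :=
  if (0 ≤ t.1 ∧ t.1 < R ∧ 0 ≤ t.2 ∧ t.2 < C) ∧ vAt st.1 t + 1 < h then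
    (setP st.1 t.1.toNat t.2.toNat (h - 1), st.2 + (h - 1 - vAt st.1 t))
  else st

-- A's step, rephrased: the queue grows exactly when the relaxation fires
def rlxq (R C h : Int) (st : List (Int × Int) × List (List Int) × Int) (t : Int × Int) :
    List (Int × Int) × List (List Int) × Int :=
  ((if (0 ≤ t.1 ∧ t.1 < R ∧ 0 ≤ t.2 ∧ t.2 < C) ∧ vAt st.2.1 t + 1 < h
    then st.1 ++ [t] else st.1), rlx R C h st.2 t)

lemma rlx_gok {R C : Int} (h : Int) {g : List (List Int)} (r : Int) (t : Int × Int)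
    (hg : GOK R C g) : GOK R C (rlx R C h (g, r) t).1 := by
  unfold rlx; split_ifs with hf
  · exact gok_setP R C g _ _ _ hg
  · exact hg

lemma rlx_shp (R C h : Int) (g : List (List Int)) (r : Int) (t : Int × Int) :
    Shp g (rlx R C h (g, r) t).1 := by
  unfold rlx; split_ifs with hf
  · exact shp_setP g _ _ _
  · exact shp_refl g

lemma rlx_mono {R C : Int} (h : Int) {g : List (List Int)} (r : Int) (t : Int × Int)
    (hg : GOK R C g) : PLe g (rlx R C h (g, r) t).1 := by
  unfold rlx; split_ifs with hf
  · intro i j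
    by_cases hij : i = t.1.toNat ∧ j = t.2.toNat
    · obtain ⟨hi, hj⟩ := row_lt_of_gok hg hf.1
      obtain ⟨rfl, rfl⟩ := hij
      show vN g t.1.toNat t.2.toNat ≤ vN (setP g t.1.toNat t.2.toNat (h - 1)) _ _
      rw [vN_setP_self _ _ _ _ hj]
      have h2 : vAt g t + 1 < h := hf.2
      unfold vAt at h2
      omega
    · show vN g i j ≤ vN (setP g t.1.toNat t.2.toNat (h - 1)) i j
      rw [vN_setP_ne _ _ _ _ _ _ hij]
  · exact ple_refl g

lemma rlx_sum {R C : Int} (h : Int) {g : List (List Int)} (r : Int) (t : Int × Int)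
    (hg : GOK R C g) :
    (rlx R C h (g, r) t).2 - SumG (rlx R C h (g, r) t).1 = r - SumG g := by
  unfold rlx; split_ifs with hf
  · obtain ⟨hi, hj⟩ := row_lt_of_gok hg hf.1
    show r + (h - 1 - vAt g t) - SumG (setP g t.1.toNat t.2.toNat (h - 1)) = r - SumG g
    rw [sumG_setP _ _ _ _ hi hj]
    unfold vAt
    ring
  · simp

lemma rlx_phi {R C : Int} (h M : Int) {g : List (List Int)} (r : Int) (t : Int × Int)
    (hg : GOK R C g) :
    pvPhi M (rlx R C h (g, r) t).1 = pvPhi M g - ((rlx R C h (g, r) t).2 - r) := by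
  unfold rlx; split_ifs with hf
  · obtain ⟨hi, hj⟩ := row_lt_of_gok hg hf.1
    show pvPhi M (setP g t.1.toNat t.2.toNat (h - 1)) = pvPhi M g - (r + (h - 1 - vAt g t) - r)
    rw [phi_setP _ _ _ _ _ hi hj]
    unfold vAt
    ring
  · simp

lemma rlx_le_M {R C : Int} (h M : Int) {g : List (List Int)} (r : Int) (t : Int × Int)
    (hg : GOK R C g) (hle : pvLe M g) (hh : h ≤ M) : pvLe M (rlx R C h (g, r) t).1 := by
  unfold rlx; split_ifs with hf
  · exact pvLe_setP M g _ _ _ hle (by omega)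
  · exact hle

lemma rlx_ret_le (R C h : Int) (g : List (List Int)) (r : Int) (t : Int × Int) :
    r ≤ (rlx R C h (g, r) t).2 := by
  unfold rlx; split_ifs with hf
  · have h2 : vAt g t + 1 < h := hf.2
    show r ≤ r + (h - 1 - vAt g t); omega
  · exact le_rfl

lemma rlx_ple_L {R C : Int} (h : Int) {g L : List (List Int)} (r : Int) (t : Int × Int)
    (hg : GOK R C g) (hL : PLe g L) (hJ : Inb R C t → h - 1 ≤ vAt L t) :
    PLe (rlx R C h (g, r) t).1 L := by
  unfold rlx; split_ifs with hf
  · intro i j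
    by_cases hij : i = t.1.toNat ∧ j = t.2.toNat
    · obtain ⟨hi, hj⟩ := row_lt_of_gok hg hf.1
      obtain ⟨rfl, rfl⟩ := hij
      show vN (setP g t.1.toNat t.2.toNat (h - 1)) _ _ ≤ vN L t.1.toNat t.2.toNat
      rw [vN_setP_self _ _ _ _ hj]
      exact hJ hf.1
    · show vN (setP g t.1.toNat t.2.toNat (h - 1)) i j ≤ vN L i j
      rw [vN_setP_ne _ _ _ _ _ _ hij]
      exact hL i j
  · exact hL

lemma rlx_after {R C : Int} (h : Int) {g : List (List Int)} (r : Int) {t : Int × Int}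
    (hg : GOK R C g) (ht : Inb R C t) : h - 1 ≤ vAt (rlx R C h (g, r) t).1 t := by
  unfold rlx; split_ifs with hf
  · obtain ⟨hi, hj⟩ := row_lt_of_gok hg ht
    show h - 1 ≤ vN (setP g t.1.toNat t.2.toNat (h - 1)) t.1.toNat t.2.toNat
    rw [vN_setP_self _ _ _ _ hj]
  · have h2 : ¬ vAt g t + 1 < h := fun hc => hf ⟨ht, hc⟩
    show h - 1 ≤ vAt g t
    omega

-- bundled invariants of a fold of canonical relaxations at a fixed height h
def FSp (R C M : Int) (g : List (List Int)) (r : Int) (st : List (List Int) × Int) : Prop :=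
  GOK R C st.1 ∧ Shp g st.1 ∧ PLe g st.1 ∧ pvLe M st.1 ∧
  (st.2 - SumG st.1 = r - SumG g) ∧ (pvPhi M st.1 = pvPhi M g - (st.2 - r)) ∧ r ≤ st.2

lemma FSp_refl (R C M : Int) (g : List (List Int)) (r : Int) (hg : GOK R C g)
    (hle : pvLe M g) : FSp R C M g r (g, r) :=
  ⟨hg, shp_refl g, ple_refl g, hle, by simp, by simp, le_rfl⟩

lemma FSp_trans {R C M : Int} {g g1 : List (List Int)} {r r1 : Int}
    {st : List (List Int) × Int}
    (h1 : FSp R C M g r (g1, r1)) (h2 : FSp R C M g1 r1 st) : FSp R C M g r st := by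
  obtain ⟨a1, b1, c1, d1, e1, f1, i1⟩ := h1
  obtain ⟨a2, b2, c2, d2, e2, f2, i2⟩ := h2
  simp only at a1 b1 c1 d1 e1 f1 i1
  exact ⟨a2, shp_trans b1 b2, ple_trans c1 c2, d2, by omega, by omega, by omega⟩

lemma FSp_step {R C : Int} (h M : Int) {g : List (List Int)} (r : Int) (t : Int × Int)
    (hg : GOK R C g) (hle : pvLe M g) (hh : h ≤ M) :
    FSp R C M g r (rlx R C h (g, r) t) :=
  ⟨rlx_gok h r t hg, rlx_shp R C h g r t, rlx_mono h r t hg, rlx_le_M h M r t hg hle hh,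
   rlx_sum h r t hg, rlx_phi h M r t hg, rlx_ret_le R C h g r t⟩

lemma FSp_fold {R C : Int} (h M : Int) : ∀ (ts : List (Int × Int)) (g : List (List Int))
    (r : Int), GOK R C g → pvLe M g → h ≤ M →
    FSp R C M g r (ts.foldl (rlx R C h) (g, r)) := by
  intro ts
  induction ts with
  | nil => intro g r hg hle _; exact FSp_refl R C M g r hg hle
  | cons t ts ih =>
    intro g r hg hle hh
    rcases hst : rlx R C h (g, r) t with ⟨g1, r1⟩
    have h1 := FSp_step h M r t hg hle hh
    rw [hst] at h1
    have h2 := ih g1 r1 h1.1 h1.2.2.2.1 hh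
    rw [List.foldl_cons, hst]
    exact FSp_trans h1 h2

lemma fold_gok_mono {R C : Int} (h : Int) : ∀ (ts : List (Int × Int))
    (g : List (List Int)) (r : Int), GOK R C g →
    GOK R C (ts.foldl (rlx R C h) (g, r)).1 ∧ PLe g (ts.foldl (rlx R C h) (g, r)).1 := by
  intro ts
  induction ts with
  | nil => intro g r hg; exact ⟨hg, ple_refl g⟩
  | cons t ts ih =>
    intro g r hg
    rcases hst : rlx R C h (g, r) t with ⟨g1, r1⟩
    have hg1 : GOK R C g1 := by have := rlx_gok h r t hg; rwa [hst] at this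
    have hm1 : PLe g g1 := by have := rlx_mono h r t hg; rwa [hst] at this
    rw [List.foldl_cons, hst]
    exact ⟨(ih g1 r1 hg1).1, ple_trans hm1 (ih g1 r1 hg1).2⟩

lemma fold_ple_L {R C : Int} (h : Int) {L : List (List Int)} :
    ∀ (ts : List (Int × Int)) (g : List (List Int)) (r : Int), GOK R C g → PLe g L →
    (∀ t ∈ ts, Inb R C t → h - 1 ≤ vAt L t) →
    PLe (ts.foldl (rlx R C h) (g, r)).1 L := by
  intro ts
  induction ts with
  | nil => intro g r _ hL _; exact hL
  | cons t ts ih =>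
    intro g r hg hL hJ
    rcases hst : rlx R C h (g, r) t with ⟨g1, r1⟩
    have hg1 : GOK R C g1 := by have := rlx_gok h r t hg; rwa [hst] at this
    have hL1 : PLe g1 L := by
      have := rlx_ple_L h r t hg hL (hJ t List.mem_cons_self)
      rwa [hst] at this
    rw [List.foldl_cons, hst]
    exact ih g1 r1 hg1 hL1 (fun u hu => hJ u (List.mem_cons_of_mem _ hu))

lemma fold_after {R C : Int} (h : Int) : ∀ (ts : List (Int × Int)) (g : List (List Int))
    (r : Int), GOK R C g →
    ∀ t ∈ ts, Inb R C t → h - 1 ≤ vAt (ts.foldl (rlx R C h) (g, r)).1 t := by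
  intro ts
  induction ts with
  | nil => intro g r _ t ht; cases ht
  | cons u ts ih =>
    intro g r hg t ht hinb
    rcases hst : rlx R C h (g, r) u with ⟨g1, r1⟩
    have hg1 : GOK R C g1 := by have := rlx_gok h r u hg; rwa [hst] at this
    rw [List.foldl_cons, hst]
    rcases List.mem_cons.mp ht with rfl | ht'
    · have h1 : h - 1 ≤ vAt g1 t := by
        have := rlx_after h r hg hinb; rwa [hst] at this
      have h2 := (fold_gok_mono h ts g1 r1 hg1).2
      have := h2 t.1.toNat t.2.toNat
      unfold vAt at h1 ⊢
      omega
    · exact ih g1 r1 hg1 t ht' hinb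

-- ===== bridges from the ports' step functions to the canonical relaxation =====

lemma seedB_eq (R C h : Int) (st : List (List Int) × Int) (nb : Int × Int)
    (hg : GOK R C st.1) : pvSeedB R C h st nb = rlx R C h st nb := by
  unfold pvSeedB rlx
  by_cases hib : 0 ≤ nb.1 ∧ nb.1 < R ∧ 0 ≤ nb.2 ∧ nb.2 < C
  · rw [if_pos hib, pvGetCellB_eq, get_vAt hg hib]
    show (if vAt st.1 nb + 1 < h then
        (pvSetCellB st.1 nb.1 nb.2 (h - 1), st.2 + (h - 1 - vAt st.1 nb)) else st) = _
    by_cases hfire : vAt st.1 nb + 1 < h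
    · rw [if_pos hfire]
      split_ifs with hc
      · rfl
      · exact absurd ⟨hib, hfire⟩ hc
    · rw [if_neg hfire]
      split_ifs with hc
      · exact absurd hc.2 hfire
      · rfl
  · rw [if_neg hib]
    split_ifs with hc
    · exact absurd hc.1 hib
    · rfl

lemma foldSeed_eq (R C h : Int) : ∀ (ts : List (Int × Int)) (st : List (List Int) × Int),
    GOK R C st.1 → ts.foldl (pvSeedB R C h) st = ts.foldl (rlx R C h) st := by
  intro ts
  induction ts with
  | nil => intro st _; rfl
  | cons t ts ih =>
    intro st hg
    rw [List.foldl_cons, List.foldl_cons, seedB_eq R C h st t hg]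
    rcases st with ⟨g, r⟩
    exact ih _ (rlx_gok h r t hg)

lemma relaxA_eq (R C x y h : Int) (st : List (Int × Int) × List (List Int) × Int)
    (d : Int × Int) (hg : GOK R C st.2.1) :
    pvRelaxA R C x y h st d = rlxq R C h st (x + d.1, y + d.2) := by
  unfold pvRelaxA rlxq rlx
  by_cases hib : 0 ≤ x + d.1 ∧ x + d.1 < R ∧ 0 ≤ y + d.2 ∧ y + d.2 < C
  · have hnot : ¬(x + d.1 < 0 ∨ R ≤ x + d.1 ∨ y + d.2 < 0 ∨ C ≤ y + d.2) := by omega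
    rw [if_neg hnot]
    have hget := get_vAt hg (t := (x + d.1, y + d.2)) hib
    simp only at hget
    rw [hget]
    show (if vAt st.2.1 (x + d.1, y + d.2) + 1 < h then
        (st.1 ++ [(x + d.1, y + d.2)], pvSetCell st.2.1 (x + d.1) (y + d.2) (h - 1),
         st.2.2 + (h - 1 - vAt st.2.1 (x + d.1, y + d.2))) else st) = _
    by_cases hfire : vAt st.2.1 (x + d.1, y + d.2) + 1 < h
    · rw [if_pos hfire]
      split_ifs with hc
      · rfl
      · exact absurd ⟨hib, hfire⟩ hc
    · rw [if_neg hfire]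
      split_ifs with hc
      · exact absurd hc.2 hfire
      · rfl
  · have hyes : x + d.1 < 0 ∨ R ≤ x + d.1 ∨ y + d.2 < 0 ∨ C ≤ y + d.2 := by omega
    rw [if_pos hyes]
    split_ifs with hc
    · exact absurd hc.1 hib
    · rfl

lemma foldA_eq (R C x y h : Int) : ∀ (ds : List (Int × Int))
    (st : List (Int × Int) × List (List Int) × Int), GOK R C st.2.1 →
    ds.foldl (pvRelaxA R C x y h) st
      = (ds.map (fun d => (x + d.1, y + d.2))).foldl (rlxq R C h) st := by
  intro ds
  induction ds with
  | nil => intro st _; rfl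
  | cons d ds ih =>
    intro st hg
    rw [List.foldl_cons, List.map_cons, List.foldl_cons, relaxA_eq R C x y h st d hg]
    rcases st with ⟨q, g, r⟩
    have : (rlxq R C h (q, g, r) (x + d.1, y + d.2)).2 = rlx R C h (g, r) (x + d.1, y + d.2) := rfl
    apply ih
    rw [this]
    exact rlx_gok h r _ hg

lemma rlxq_proj (R C h : Int) : ∀ (ts : List (Int × Int)) (q : List (Int × Int))
    (g : List (List Int)) (r : Int),
    (ts.foldl (rlxq R C h) (q, g, r)).2 = ts.foldl (rlx R C h) (g, r) := by
  intro ts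
  induction ts with
  | nil => intro q g r; rfl
  | cons t ts ih =>
    intro q g r
    rw [List.foldl_cons, List.foldl_cons]
    rcases hst : rlx R C h (g, r) t with ⟨g1, r1⟩
    have : rlxq R C h (q, g, r) t
        = (if (0 ≤ t.1 ∧ t.1 < R ∧ 0 ≤ t.2 ∧ t.2 < C) ∧ vAt g t + 1 < h
           then q ++ [t] else q, g1, r1) := by
      unfold rlxq
      rw [hst]
    rw [this]
    split_ifs <;> exact ih _ g1 r1

lemma phys_inj {R C : Int} {u t : Int × Int} (hu : Inb R C u) (ht : Inb R C t)
    (h1 : u.1.toNat = t.1.toNat) (h2 : u.2.toNat = t.2.toNat) : u = t := by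
  obtain ⟨hu1, _, hu2, _⟩ := hu
  obtain ⟨ht1, _, ht2, _⟩ := ht
  refine Prod.ext ?_ ?_ <;> omega

-- spec of A's queue-growing relaxation fold over targets ts
def QSpec (R C h : Int) (ts : List (Int × Int)) (g : List (List Int)) (q : List (Int × Int))
    (r : Int) (st : List (Int × Int) × List (List Int) × Int) : Prop :=
  GOK R C st.2.1 ∧ PLe g st.2.1 ∧
  ∃ app, st.1 = q ++ app ∧
    (∀ t ∈ app, t ∈ ts ∧ Inb R C t ∧ vAt g t < vAt st.2.1 t) ∧
    (∀ i j : Nat, vN st.2.1 i j ≠ vN g i j → ∃ t ∈ app, t.1.toNat = i ∧ t.2.toNat = j) ∧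
    (app.length : Int) ≤ st.2.2 - r

lemma QSpec_step (R C h : Int) (t : Int × Int) (g : List (List Int)) (q : List (Int × Int))
    (r : Int) (hg : GOK R C g) : QSpec R C h [t] g q r (rlxq R C h (q, g, r) t) := by
  refine ⟨rlx_gok h r t hg, rlx_mono h r t hg, ?_⟩
  show ∃ app, (rlxq R C h (q, g, r) t).1 = q ++ app ∧ _
  unfold rlxq rlx
  split_ifs with hf
  · refine ⟨[t], rfl, ?_, ?_, ?_⟩
    · intro u hu
      rcases List.mem_singleton.mp hu with rfl
      refine ⟨List.mem_singleton.mpr rfl, hf.1, ?_⟩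
      obtain ⟨hi, hj⟩ := row_lt_of_gok hg hf.1
      have h2 : vAt g u + 1 < h := hf.2
      show vAt g u < vN (setP g u.1.toNat u.2.toNat (h - 1)) u.1.toNat u.2.toNat
      rw [vN_setP_self _ _ _ _ hj]
      omega
    · intro i j hne
      have hne' : vN (setP g t.1.toNat t.2.toNat (h - 1)) i j ≠ vN g i j := hne
      by_cases hij : i = t.1.toNat ∧ j = t.2.toNat
      · exact ⟨t, List.mem_singleton.mpr rfl, hij.1.symm, hij.2.symm⟩
      · exact absurd (vN_setP_ne _ _ _ _ _ _ hij) hne'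
    · have h2 : vAt g t + 1 < h := hf.2
      show (([t] : List (Int × Int)).length : Int) ≤ r + (h - 1 - vAt g t) - r
      simp
      omega
  · exact ⟨[], by simp, by simp, fun i j hne => absurd rfl hne, by simp⟩

lemma QSpec_trans {R C h : Int} {ts1 ts2 : List (Int × Int)} {g g1 : List (List Int)}
    {q q1 : List (Int × Int)} {r r1 : Int} {st : List (Int × Int) × List (List Int) × Int}
    (h1 : QSpec R C h ts1 g q r (q1, g1, r1)) (h2 : QSpec R C h ts2 g1 q1 r1 st) :
    QSpec R C h (ts1 ++ ts2) g q r st := by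
  obtain ⟨gok1, ple1, app1, he1, hr1, hc1, hl1⟩ := h1
  obtain ⟨gok2, ple2, app2, he2, hr2, hc2, hl2⟩ := h2
  simp only at gok1 ple1 he1 hr1 hc1 hl1
  refine ⟨gok2, ple_trans ple1 ple2, app1 ++ app2, ?_, ?_, ?_, ?_⟩
  · rw [he2, he1, List.append_assoc]
  · intro t ht
    rcases List.mem_append.mp ht with ht' | ht'
    · obtain ⟨hts, hinb, hlt⟩ := hr1 t ht'
      refine ⟨List.mem_append.mpr (Or.inl hts), hinb, ?_⟩
      have := ple2 t.1.toNat t.2.toNat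
      unfold vAt at hlt ⊢
      omega
    · obtain ⟨hts, hinb, hlt⟩ := hr2 t ht'
      refine ⟨List.mem_append.mpr (Or.inr hts), hinb, ?_⟩
      have := ple1 t.1.toNat t.2.toNat
      unfold vAt at hlt ⊢
      omega
  · intro i j hne
    by_cases hmid : vN g1 i j = vN g i j
    · have : vN st.2.1 i j ≠ vN g1 i j := by rw [hmid]; exact hne
      obtain ⟨t, ht, he⟩ := hc2 i j this
      exact ⟨t, List.mem_append.mpr (Or.inr ht), he⟩
    · obtain ⟨t, ht, he⟩ := hc1 i j hmid
      exact ⟨t, List.mem_append.mpr (Or.inl ht), he⟩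
  · have hle1 : r ≤ r1 := by
      have := app1.length
      have h0 : (0 : Int) ≤ (app1.length : Int) := by positivity
      omega
    rw [List.length_append]
    push_cast
    omega

lemma QSpec_fold (R C h : Int) : ∀ (ts : List (Int × Int)) (g : List (List Int))
    (q : List (Int × Int)) (r : Int), GOK R C g →
    QSpec R C h ts g q r (ts.foldl (rlxq R C h) (q, g, r)) := by
  intro ts
  induction ts with
  | nil =>
    intro g q r hg
    exact ⟨hg, ple_refl g, [], by simp, by simp, fun i j hne => absurd rfl hne, by simp⟩
  | cons t ts ih =>
    intro g q r hg
    have hstep := QSpec_step R C h t g q r hg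
    rcases hst : rlxq R C h (q, g, r) t with ⟨q1, g1, r1⟩
    rw [hst] at hstep
    have hrest := ih g1 q1 r1 hstep.1
    rw [List.foldl_cons, hst]
    have := QSpec_trans hstep hrest
    rwa [List.singleton_append] at this

-- ===== A's loop: value, closedness of the final grid, and minimality =====
lemma loopA_main (R C M : Int) (O : List (List Int)) :
    ∀ (fuel : Nat) (q : List (Int × Int)) (g : List (List Int)) (r : Int),
    GOK R C g → GOK R C O → Shp O g → PLe O g → pvLe M g →
    (∀ t ∈ q, Inb R C t ∧ vAt O t < vAt g t) →
    (∀ t : Int × Int, Inb R C t → vAt O t < vAt g t → CellOK R C g t ∨ t ∈ q) →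
    2 * pvPhi M g + (q.length : Int) ≤ (fuel : Int) →
    ∃ gF, pvLoopA R C fuel q g r = r + (SumG gF - SumG g)
      ∧ GOK R C gF ∧ Shp O gF ∧ PLe O gF ∧ PLe g gF ∧ pvLe M gF ∧ RCk R C O gF
      ∧ (∀ L, PLe g L → RCk R C O L → PLe gF L) := by
  intro fuel
  induction fuel with
  | zero =>
    intro q g r hg hO hshp hOle hle hq hexc hfuel
    cases q with
    | nil =>
      refine ⟨g, by simp [pvLoopA], hg, hshp, hOle, ple_refl g, hle, ?_, fun L hL _ => hL⟩
      intro t hinb hraised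
      rcases hexc t hinb hraised with hok | hmem
      · exact hok
      · cases hmem
    | cons p q' =>
      exfalso
      have hphi := pvPhi_nonneg M g hle
      simp only [List.length_cons] at hfuel
      push_cast at hfuel
      omega
  | succ f ih =>
    intro q g r hg hO hshp hOle hle hq hexc hfuel
    cases q with
    | nil =>
      refine ⟨g, by simp [pvLoopA], hg, hshp, hOle, ple_refl g, hle, ?_, fun L hL _ => hL⟩
      intro t hinb hraised
      rcases hexc t hinb hraised with hok | hmem
      · exact hok
      · cases hmem
    | cons p q' =>
      obtain ⟨hpinb, hpraised⟩ := hq p List.mem_cons_self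
      have hget : pvGetCell g p.1 p.2 = some (vAt g p) := get_vAt hg hpinb
      have hmap : ([((1 : Int), (0 : Int)), (-1, 0), (0, 1), (0, -1)].map
          (fun d => (p.1 + d.1, p.2 + d.2))) = Nbs p := by
        simp [Nbs, sub_eq_add_neg]
      have hfold := foldA_eq R C p.1 p.2 (vAt g p)
        [((1 : Int), (0 : Int)), (-1, 0), (0, 1), (0, -1)] (q', g, r) hg
      rw [hmap] at hfold
      have hQ := QSpec_fold R C (vAt g p) (Nbs p) g q' r hg
      have hproj := rlxq_proj R C (vAt g p) (Nbs p) q' g r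
      rcases hst : (Nbs p).foldl (rlxq R C (vAt g p)) (q', g, r) with ⟨q1, g1, r1⟩
      rw [hst] at hQ hproj
      have hF := FSp_fold (vAt g p) M (Nbs p) g r hg hle
        (vAt_le_of_pvLe hg hle hpinb)
      rw [← hproj] at hF
      obtain ⟨hgok1, hple1, app, happ, hrapp, hchg, hlapp⟩ := hQ
      simp only at hgok1 hple1 happ hrapp hchg hlapp
      obtain ⟨_, hshp1, _, hle1, hsum1, hphi1, hret1⟩ := hF
      simp only [← hproj] at hshp1 hsum1 hphi1 hret1
      have hafter : ∀ t ∈ Nbs p, Inb R C t → vAt g p - 1 ≤ vAt g1 t := by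
        intro t ht hinb
        have := fold_after (vAt g p) (Nbs p) g r hg t ht hinb
        rwa [← hproj] at this
      -- new queue invariant
      have hq1 : ∀ t ∈ q1, Inb R C t ∧ vAt O t < vAt g t ∨ Inb R C t ∧ vAt g t < vAt g1 t := by
        intro t ht
        rw [happ] at ht
        rcases List.mem_append.mp ht with ht' | ht'
        · exact Or.inl (hq t (List.mem_cons_of_mem _ ht'))
        · exact Or.inr ⟨(hrapp t ht').2.1, (hrapp t ht').2.2⟩
      have hq1' : ∀ t ∈ q1, Inb R C t ∧ vAt O t < vAt g1 t := by
        intro t ht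
        rcases hq1 t ht with ⟨hinb, hlt⟩ | ⟨hinb, hlt⟩
        · refine ⟨hinb, ?_⟩
          have := hple1 t.1.toNat t.2.toNat
          unfold vAt at hlt ⊢
          omega
        · refine ⟨hinb, ?_⟩
          have := hOle t.1.toNat t.2.toNat
          unfold vAt at hlt ⊢
          omega
      have hexc1 : ∀ t : Int × Int, Inb R C t → vAt O t < vAt g1 t →
          CellOK R C g1 t ∨ t ∈ q1 := by
        intro t hinb hraised
        by_cases hch : vAt g1 t = vAt g t
        · have hrg : vAt O t < vAt g t := by rw [← hch]; exact hraised
          rcases hexc t hinb hrg with hok | hmem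
          · left
            intro n hn hninb
            have hmono := hple1 n.1.toNat n.2.toNat
            have := hok n hn hninb
            unfold vAt at *
            omega
          · rcases List.mem_cons.mp hmem with rfl | hmem'
            · left
              intro n hn hninb
              have := hafter n hn hninb
              unfold vAt at *
              omega
            · right
              rw [happ]
              exact List.mem_append.mpr (Or.inl hmem')
        · have hne : vN g1 t.1.toNat t.2.toNat ≠ vN g t.1.toNat t.2.toNat := hch
          obtain ⟨u, hu, hu1, hu2⟩ := hchg _ _ hne
          have : u = t := phys_inj (hrapp u hu).2.1 hinb hu1 hu2
          right
          rw [happ]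
          exact List.mem_append.mpr (Or.inr (this ▸ hu))
      -- fuel bound
      have hfuel1 : 2 * pvPhi M g1 + (q1.length : Int) ≤ (f : Int) := by
        have hql : q1.length = q'.length + app.length := by rw [happ, List.length_append]
        simp only [List.length_cons] at hfuel
        rw [hql]
        push_cast at hfuel ⊢
        omega
      have hOle1 : PLe O g1 := ple_trans hOle hple1
      obtain ⟨gF, hval, hgokF, hshpF, hOleF, hpleF, hleF, hrcF, hminF⟩ :=
        ih q1 g1 r1 hgok1 hO (shp_trans hshp hshp1) hOle1 hle1 hq1' hexc1 hfuel1
      refine ⟨gF, ?_, hgokF, hshpF, hOleF, ple_trans hple1 hpleF, hleF, hrcF, ?_⟩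
      · show (match pvGetCell g p.1 p.2 with
          | none => r
          | some h =>
            match [((1 : Int), (0 : Int)), (-1, 0), (0, 1), (0, -1)].foldl
                (pvRelaxA R C p.1 p.2 h) (q', g, r) with
            | (q'', cells', ret') => pvLoopA R C f q'' cells' ret') = r + (SumG gF - SumG g)
        rw [hget]
        show (match [((1 : Int), (0 : Int)), (-1, 0), (0, 1), (0, -1)].foldl
            (pvRelaxA R C p.1 p.2 (vAt g p)) (q', g, r) with
          | (q'', cells', ret') => pvLoopA R C f q'' cells' ret') = r + (SumG gF - SumG g)
        rw [hfold, hst]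
        show pvLoopA R C f q1 g1 r1 = r + (SumG gF - SumG g)
        rw [hval]
        omega
      · intro L hL hRC
        have hJ : ∀ t ∈ Nbs p, Inb R C t → vAt g p - 1 ≤ vAt L t := by
          intro t ht hinb
          have hpL := hL p.1.toNat p.2.toNat
          have hraisedL : vAt O p < vAt L p := by
            unfold vAt at hpraised ⊢
            omega
          have := hRC p hpinb hraisedL t ht hinb
          unfold vAt at *
          omega
        have hg1L : PLe g1 L := by
          have := fold_ple_L (vAt g p) (Nbs p) g r hg hL hJ
          rwa [← hproj] at this
        exact hminF L hg1L hRC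

-- ===== B's sweep: flag behaviour of the inner relaxation fold =====

lemma relaxS_eq (R C h : Int) (st : List (List Int) × Int × Bool) (nb : Int × Int)
    (hg : GOK R C st.1) :
    pvRelaxS R C h st nb =
      ((rlx R C h (st.1, st.2.1) nb).1, (rlx R C h (st.1, st.2.1) nb).2,
       if (0 ≤ nb.1 ∧ nb.1 < R ∧ 0 ≤ nb.2 ∧ nb.2 < C) ∧ vAt st.1 nb + 1 < h
       then true else st.2.2) := by
  unfold pvRelaxS rlx
  by_cases hib : 0 ≤ nb.1 ∧ nb.1 < R ∧ 0 ≤ nb.2 ∧ nb.2 < C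
  · rw [if_pos hib, pvGetCellB_eq, get_vAt hg hib]
    show (if vAt st.1 nb + 1 < h then
        (pvSetCellB st.1 nb.1 nb.2 (h - 1), st.2.1 + (h - 1 - vAt st.1 nb), true) else st) = _
    by_cases hfire : vAt st.1 nb + 1 < h
    · rw [if_pos hfire]
      split_ifs with hc
      · rfl
      · exact absurd ⟨hib, hfire⟩ hc
    · rw [if_neg hfire]
      split_ifs with hc
      · exact absurd hc.2 hfire
      · rfl
  · rw [if_neg hib]
    split_ifs with hc
    · exact absurd hc.1 hib
    · rfl

lemma foldS_all (R C h : Int) : ∀ (ts : List (Int × Int))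
    (st : List (List Int) × Int × Bool), GOK R C st.1 →
    ((ts.foldl (pvRelaxS R C h) st).1, (ts.foldl (pvRelaxS R C h) st).2.1)
        = ts.foldl (rlx R C h) (st.1, st.2.1) ∧
    (st.2.2 = true → (ts.foldl (pvRelaxS R C h) st).2.2 = true) ∧
    ((ts.foldl (pvRelaxS R C h) st).2.2 = false → ts.foldl (pvRelaxS R C h) st = st) ∧
    (st.2.2 = false → (ts.foldl (pvRelaxS R C h) st).2.2 = true →
        st.2.1 + 1 ≤ (ts.foldl (pvRelaxS R C h) st).2.1) ∧
    st.2.1 ≤ (ts.foldl (pvRelaxS R C h) st).2.1 ∧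
    ((ts.foldl (pvRelaxS R C h) st).2.2 = false →
        ∀ t ∈ ts, Inb R C t → h - 1 ≤ vAt st.1 t) := by
  intro ts
  induction ts with
  | nil =>
    intro st hg
    exact ⟨rfl, fun h => h, fun _ => rfl, fun h1 h2 => absurd h2 (h1 ▸ by simp [h1]),
      le_rfl, fun _ t ht => absurd ht (List.not_mem_nil)⟩
  | cons t ts ih =>
    intro st hg
    rcases st with ⟨g, r, b⟩
    have hbr := relaxS_eq R C h (g, r, b) t hg
    rcases hrx : rlx R C h (g, r) t with ⟨g1, r1⟩
    have hg1 : GOK R C g1 := by have := rlx_gok h r t hg; rwa [hrx] at this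
    simp only [hrx] at hbr
    by_cases hfire : (0 ≤ t.1 ∧ t.1 < R ∧ 0 ≤ t.2 ∧ t.2 < C) ∧ vAt g t + 1 < h
    · rw [if_pos hfire] at hbr
      have hstep : pvRelaxS R C h (g, r, b) t = (g1, r1, true) := hbr
      have hrgain : r + 1 ≤ r1 := by
        have h2 : vAt g t + 1 < h := hfire.2
        have hx : rlx R C h (g, r) t = (setP g t.1.toNat t.2.toNat (h - 1),
            r + (h - 1 - vAt g t)) := by
          unfold rlx; rw [if_pos hfire]
        rw [hx] at hrx
        have := ((Prod.mk.injEq _ _ _ _).mp hrx).2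
        omega
      obtain ⟨ihp, ihm, ihf, ihi, ihl, ihc⟩ := ih (g1, r1, true) hg1
      have ihl' : r1 ≤ (ts.foldl (pvRelaxS R C h) (g1, r1, true)).2.1 := ihl
      have ihm' : (ts.foldl (pvRelaxS R C h) (g1, r1, true)).2.2 = true := ihm rfl
      rw [List.foldl_cons, hstep]
      refine ⟨?_, fun _ => ihm', ?_, ?_, ?_, ?_⟩
      · rw [ihp, List.foldl_cons, hrx]
      · intro hfalse
        rw [hfalse] at ihm'
        cases ihm'
      · intro _ _
        show r + 1 ≤ _
        omega
      · show r ≤ _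
        omega
      · intro hfalse
        rw [hfalse] at ihm'
        cases ihm'
    · rw [if_neg hfire] at hbr
      have hrxgr : rlx R C h (g, r) t = (g, r) := by unfold rlx; rw [if_neg hfire]
      rw [hrxgr] at hrx
      injection hrx with e1 e2
      subst e1; subst e2
      have hstep : pvRelaxS R C h (g, r, b) t = (g, r, b) := hbr
      obtain ⟨ihp, ihm, ihf, ihi, ihl, ihc⟩ := ih (g, r, b) hg
      rw [List.foldl_cons, hstep]
      refine ⟨?_, ihm, ihf, ihi, ihl, ?_⟩
      · rw [ihp, List.foldl_cons, hrxgr]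
      · intro hfalse u hu hinb
        rcases List.mem_cons.mp hu with rfl | hu'
        · have hnf : ¬ vAt g u + 1 < h := fun hc => hfire ⟨hinb, hc⟩
          show h - 1 ≤ vAt g u
          omega
        · exact ihc hfalse u hu' hinb

-- ===== B's sweep: one pass over the cell list =====

def cellsOf (R C : Int) : List (Int × Int) :=
  (PySem.List.pyRange 0 R 1).flatMap
    (fun x => (PySem.List.pyRange 0 C 1).map (fun y => (x, y)))

lemma mem_cellsOf (R C : Int) (p : Int × Int) : p ∈ cellsOf R C ↔ Inb R C p := by
  unfold cellsOf Inb
  simp only [List.mem_flatMap, List.mem_map, PySem.List.mem_pyRange_one]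
  constructor
  · rintro ⟨x, ⟨hx1, hx2⟩, y, ⟨hy1, hy2⟩, rfl⟩
    exact ⟨hx1, hx2, hy1, hy2⟩
  · rintro ⟨h1, h2, h3, h4⟩
    exact ⟨p.1, ⟨h1, h2⟩, p.2, ⟨h3, h4⟩, rfl⟩

lemma pass_eq_fold (R C : Int) (orig : List (List Int)) (st : List (List Int) × Int × Bool) :
    pvPassB R C orig st
      = (cellsOf R C).foldl (fun st p => pvCellStep R C orig st p.1 p.2) st := by
  unfold pvPassB cellsOf
  rw [List.foldl_flatMap]
  congr 1
  funext st x
  rw [List.foldl_map]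

-- one cell of a pass, analysed
lemma cellStep_false (R C : Int) (O : List (List Int)) (g : List (List Int)) (r : Int)
    (b : Bool) (p : Int × Int) (hg : GOK R C g) (hO : GOK R C O) (hp : Inb R C p)
    (hfalse : (pvCellStep R C O (g, r, b) p.1 p.2).2.2 = false) :
    pvCellStep R C O (g, r, b) p.1 p.2 = (g, r, b) ∧
      (vAt O p < vAt g p → CellOK R C g p) := by
  have hgets : pvGetCellB g p.1 p.2 = some (vAt g p) := by
    rw [pvGetCellB_eq]; exact get_vAt hg hp
  have hgeto : pvGetCellB O p.1 p.2 = some (vAt O p) := by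
    rw [pvGetCellB_eq]; exact get_vAt hO hp
  have hred : pvCellStep R C O (g, r, b) p.1 p.2
      = (if vAt O p < vAt g p
         then (Nbs p).foldl (pvRelaxS R C (vAt g p)) (g, r, b) else (g, r, b)) := by
    unfold pvCellStep
    rw [hgets, hgeto]
    rfl
  rw [hred] at hfalse ⊢
  by_cases hraise : vAt O p < vAt g p
  · rw [if_pos hraise] at hfalse ⊢
    obtain ⟨_, _, ihf, _, _, ihc⟩ := foldS_all R C (vAt g p) (Nbs p) (g, r, b) hg
    exact ⟨ihf hfalse, fun _ n hn hninb => ihc hfalse n hn hninb⟩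
  · rw [if_neg hraise] at hfalse ⊢
    exact ⟨rfl, fun hc => absurd hc hraise⟩

-- reduction of one pass cell to its two branches
lemma cellStep_red (R C : Int) (O g : List (List Int)) (r : Int) (b : Bool) (p : Int × Int)
    (hg : GOK R C g) (hO : GOK R C O) (hp : Inb R C p) :
    pvCellStep R C O (g, r, b) p.1 p.2
      = (if vAt O p < vAt g p
         then (Nbs p).foldl (pvRelaxS R C (vAt g p)) (g, r, b) else (g, r, b)) := by
  have hgets : pvGetCellB g p.1 p.2 = some (vAt g p) := by
    rw [pvGetCellB_eq]; exact get_vAt hg hp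
  have hgeto : pvGetCellB O p.1 p.2 = some (vAt O p) := by
    rw [pvGetCellB_eq]; exact get_vAt hO hp
  unfold pvCellStep
  rw [hgets, hgeto]
  rfl

-- bundled invariants of a prefix of one sweep pass
def CSp (R C M : Int) (O g : List (List Int)) (r : Int) (b : Bool)
    (st : List (List Int) × Int × Bool) : Prop :=
  GOK R C st.1 ∧ Shp g st.1 ∧ PLe g st.1 ∧ pvLe M st.1 ∧
  (st.2.1 - SumG st.1 = r - SumG g) ∧ (pvPhi M st.1 = pvPhi M g - (st.2.1 - r)) ∧
  r ≤ st.2.1 ∧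
  (b = true → st.2.2 = true) ∧
  (b = false → st.2.2 = true → r + 1 ≤ st.2.1) ∧
  (∀ L, RCk R C O L → PLe g L → PLe st.1 L)

lemma CSp_refl (R C M : Int) (O g : List (List Int)) (r : Int) (b : Bool)
    (hg : GOK R C g) (hle : pvLe M g) : CSp R C M O g r b (g, r, b) :=
  ⟨hg, shp_refl g, ple_refl g, hle, by simp, by simp, le_rfl, fun h => h,
   fun h1 h2 => absurd h2 (by rw [show ((g, r, b) : List (List Int) × Int × Bool).2.2 = b from rfl, h1]; simp),
   fun _ _ hgL => hgL⟩

lemma CSp_trans {R C M : Int} {O g g1 : List (List Int)} {r r1 : Int} {b b1 : Bool}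
    {st : List (List Int) × Int × Bool}
    (h1 : CSp R C M O g r b (g1, r1, b1)) (h2 : CSp R C M O g1 r1 b1 st) :
    CSp R C M O g r b st := by
  obtain ⟨a1, s1, p1, l1, e1, f1, i1, m1, n1, q1⟩ := h1
  obtain ⟨a2, s2, p2, l2, e2, f2, i2, m2, n2, q2⟩ := h2
  simp only at a1 s1 p1 l1 e1 f1 i1 m1 n1 q1
  refine ⟨a2, shp_trans s1 s2, ple_trans p1 p2, l2, by omega, by omega, by omega,
    fun hb => m2 (m1 hb), ?_, fun L hRC hgL => q2 L hRC (q1 L hRC hgL)⟩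
  intro hb hout
  cases hb1 : b1 with
  | true => have := n1 hb hb1; omega
  | false => have := n2 hb1 hout; omega

lemma CSp_cellStep (R C M : Int) (O : List (List Int)) (g : List (List Int)) (r : Int)
    (b : Bool) (p : Int × Int) (hg : GOK R C g) (hO : GOK R C O) (hOle : PLe O g)
    (hle : pvLe M g) (hp : Inb R C p) :
    CSp R C M O g r b (pvCellStep R C O (g, r, b) p.1 p.2) := by
  rw [cellStep_red R C O g r b p hg hO hp]
  by_cases hraise : vAt O p < vAt g p
  · rw [if_pos hraise]
    have hh : vAt g p ≤ M := vAt_le_of_pvLe hg hle hp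
    obtain ⟨ihp, ihm, ihf, ihi, ihl, ihc⟩ := foldS_all R C (vAt g p) (Nbs p) (g, r, b) hg
    have hF := FSp_fold (vAt g p) M (Nbs p) g r hg hle hh
    obtain ⟨fgok, fshp, fple, fle, fsum, fphi, fret⟩ := hF
    rcases hst : (Nbs p).foldl (pvRelaxS R C (vAt g p)) (g, r, b) with ⟨g1, r1, b1⟩
    rw [hst] at ihp ihm ihi ihl
    have hp1 : g1 = ((Nbs p).foldl (rlx R C (vAt g p)) (g, r)).1 := by
      have := congrArg Prod.fst ihp; simpa using this
    have hp2 : r1 = ((Nbs p).foldl (rlx R C (vAt g p)) (g, r)).2 := by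
      have := congrArg Prod.snd ihp; simpa using this
    rw [← hp1] at fgok fshp fple fle
    rw [← hp1, ← hp2] at fsum fphi
    rw [← hp2] at fret
    refine ⟨fgok, fshp, fple, fle, fsum, fphi, fret, ihm, ihi, ?_⟩
    intro L hRC hgL
    have hJ : ∀ t ∈ Nbs p, Inb R C t → vAt g p - 1 ≤ vAt L t := by
      intro t ht hinb
      have hpL := hgL p.1.toNat p.2.toNat
      have hraisedL : vAt O p < vAt L p := by unfold vAt at hraise ⊢; omega
      have := hRC p hp hraisedL t ht hinb
      unfold vAt at *
      omega
    have := fold_ple_L (vAt g p) (Nbs p) g r hg hgL hJ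
    show PLe g1 L
    rw [hp1]
    exact this
  · rw [if_neg hraise]
    exact CSp_refl R C M O g r b hg hle

lemma CSp_fold (R C M : Int) (O : List (List Int)) (hO : GOK R C O) :
    ∀ (ps : List (Int × Int)) (g : List (List Int)) (r : Int) (b : Bool),
    GOK R C g → pvLe M g → PLe O g → (∀ p ∈ ps, Inb R C p) →
    CSp R C M O g r b (ps.foldl (fun st p => pvCellStep R C O st p.1 p.2) (g, r, b)) := by
  intro ps
  induction ps with
  | nil => intro g r b hg hle _ _; exact CSp_refl R C M O g r b hg hle
  | cons p ps ih =>
    intro g r b hg hle hOle hps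
    have hstep := CSp_cellStep R C M O g r b p hg hO hOle hle (hps p List.mem_cons_self)
    rcases hst : pvCellStep R C O (g, r, b) p.1 p.2 with ⟨g1, r1, b1⟩
    rw [hst] at hstep
    have hOle1 : PLe O g1 := ple_trans hOle hstep.2.2.1
    have hrest := ih g1 r1 b1 hstep.1 hstep.2.2.2.1 hOle1
      (fun u hu => hps u (List.mem_cons_of_mem _ hu))
    rw [List.foldl_cons, hst]
    exact CSp_trans hstep hrest

lemma fold_false (R C M : Int) (O : List (List Int)) (hO : GOK R C O) :
    ∀ (ps : List (Int × Int)) (g : List (List Int)) (r : Int),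
    GOK R C g → pvLe M g → PLe O g → (∀ p ∈ ps, Inb R C p) →
    (ps.foldl (fun st p => pvCellStep R C O st p.1 p.2) (g, r, false)).2.2 = false →
    ps.foldl (fun st p => pvCellStep R C O st p.1 p.2) (g, r, false) = (g, r, false) ∧
      ∀ p ∈ ps, vAt O p < vAt g p → CellOK R C g p := by
  intro ps
  induction ps with
  | nil => intro g r _ _ _ _ _; exact ⟨rfl, fun p hp => absurd hp (List.not_mem_nil)⟩
  | cons p ps ih =>
    intro g r hg hle hOle hps hfalse
    have hpinb := hps p List.mem_cons_self
    rcases hst : pvCellStep R C O (g, r, false) p.1 p.2 with ⟨g1, r1, b1⟩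
    rw [List.foldl_cons, hst] at hfalse ⊢
    have hstep := CSp_cellStep R C M O g r false p hg hO hOle hle hpinb
    rw [hst] at hstep
    have hb1 : b1 = false := by
      by_contra hb
      have hb1t : b1 = true := by cases b1 <;> simp_all
      have hrest := CSp_fold R C M O hO ps g1 r1 b1 hstep.1 hstep.2.2.2.1
        (ple_trans hOle hstep.2.2.1) (fun u hu => hps u (List.mem_cons_of_mem _ hu))
      have := hrest.2.2.2.2.2.2.2.1 hb1t
      rw [hfalse] at this
      cases this
    subst hb1
    have hcf := cellStep_false R C O g r false p hg hO hpinb (by rw [hst])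
    rw [hst] at hcf
    have hg1 : g1 = g ∧ r1 = r := by
      have := hcf.1
      exact ⟨congrArg (fun s => s.1) this, congrArg (fun s => s.2.1) this⟩
    obtain ⟨rfl, rfl⟩ := hg1
    obtain ⟨heq, hcons⟩ := ih g1 r1 hg hle hOle
      (fun u hu => hps u (List.mem_cons_of_mem _ hu)) hfalse
    refine ⟨heq, ?_⟩
    intro u hu hraised
    rcases List.mem_cons.mp hu with rfl | hu'
    · exact hcf.2 hraised
    · exact hcons u hu' hraised

-- ===== B's sweep loop: value, closedness, minimality =====
lemma sweep_main (R C M : Int) (O : List (List Int)) (hO : GOK R C O) :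
    ∀ (fuel : Nat) (g : List (List Int)) (r : Int),
    GOK R C g → Shp O g → PLe O g → pvLe M g →
    pvPhi M g < (fuel : Int) →
    ∃ gF, pvSweepB R C O fuel g r = r + (SumG gF - SumG g)
      ∧ Shp O gF ∧ PLe g gF ∧ RCk R C O gF
      ∧ (∀ L, PLe g L → RCk R C O L → PLe gF L) := by
  intro fuel
  induction fuel with
  | zero =>
    intro g r _ _ _ hle hfuel
    exfalso
    have := pvPhi_nonneg M g hle
    simp only [Nat.cast_zero] at hfuel
    omega
  | succ f ih =>
    intro g r hg hshp hOle hle hfuel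
    have hcells : ∀ p ∈ cellsOf R C, Inb R C p := fun p hp => (mem_cellsOf R C p).mp hp
    have hCS := CSp_fold R C M O hO (cellsOf R C) g r false hg hle hOle hcells
    rcases hst : (cellsOf R C).foldl (fun st p => pvCellStep R C O st p.1 p.2) (g, r, false)
      with ⟨g1, r1, b1⟩
    rw [hst] at hCS
    obtain ⟨gok1, shp1, ple1, le1, sum1, phi1, rle1, _, incr1, min1⟩ := hCS
    simp only at gok1 shp1 ple1 le1 sum1 phi1 rle1 min1
    have hunf : pvSweepB R C O (f + 1) g r
        = (if b1 then pvSweepB R C O f g1 r1 else r1) := by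
      show (match pvPassB R C O (g, r, false) with
        | (cells', ret', changed) => if changed then pvSweepB R C O f cells' ret' else ret')
        = _
      rw [pass_eq_fold, hst]
    cases b1 with
    | false =>
      obtain ⟨heq, hclosed⟩ := fold_false R C M O hO (cellsOf R C) g r hg hle hOle hcells
        (by rw [hst])
      rw [hst] at heq
      have hg1 : g1 = g ∧ r1 = r :=
        ⟨congrArg (fun s => s.1) heq, congrArg (fun s => s.2.1) heq⟩
      obtain ⟨rfl, rfl⟩ := hg1
      refine ⟨g1, by rw [hunf]; simp, hshp, ple_refl g1, ?_, fun L hL _ => hL⟩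
      intro t hinb hraised
      exact hclosed t ((mem_cellsOf R C t).mpr hinb) hraised
    | true =>
      have hr1 : r + 1 ≤ r1 := incr1 rfl rfl
      have hfuel1 : pvPhi M g1 < (f : Int) := by
        push_cast at hfuel
        omega
      obtain ⟨gF, hval, hshpF, hpleF, hrcF, hminF⟩ :=
        ih g1 r1 gok1 (shp_trans hshp shp1) (ple_trans hOle ple1) le1 hfuel1
      refine ⟨gF, ?_, hshpF, ple_trans ple1 hpleF, hrcF, ?_⟩
      · rw [hunf]
        simp only [if_true]
        rw [hval]
        omega
      · intro L hgL hRC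
        exact hminF L (min1 L hRC hgL) hRC

lemma sum_le_of_getD : ∀ (a a' : List Int), a.length = a'.length →
    (∀ j : Nat, a.getD j 0 ≤ a'.getD j 0) → a.sum ≤ a'.sum := by
  intro a
  induction a with
  | nil =>
    intro a' hlen _
    have : a' = [] := List.length_eq_zero_iff.mp hlen.symm
    subst this
    simp
  | cons x a ih =>
    intro a' hlen hle
    cases a' with
    | nil => simp at hlen
    | cons x' a'' =>
      simp only [List.sum_cons]
      have h0 := hle 0
      simp only [List.getD_cons_zero] at h0
      have ht := ih a'' (by simpa using hlen) (fun j => by simpa using hle (j + 1))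
      omega

lemma sumG_le_of_ple : ∀ (g g' : List (List Int)), Shp g g' → PLe g g' →
    SumG g ≤ SumG g' := by
  intro g
  induction g with
  | nil =>
    intro g' hshp _
    have : g' = [] := List.length_eq_zero_iff.mp hshp.1.symm
    subst this
    simp [SumG]
  | cons a g ih =>
    intro g' hshp hple
    cases g' with
    | nil => simp [Shp] at hshp
    | cons a' g'' =>
      show a.sum + SumG g ≤ a'.sum + SumG g''
      have hh := hshp.2 0
      simp only [List.getD_cons_zero] at hh
      have hhead : a.sum ≤ a'.sum :=
        sum_le_of_getD a a' hh (fun j => by simpa [vN] using hple 0 j)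
      have htail : SumG g ≤ SumG g'' := by
        apply ih g''
        · exact ⟨by simpa using hshp.1, fun i => by simpa using hshp.2 (i + 1)⟩
        · intro i j
          have := hple (i + 1) j
          simpa [vN] using this
      omega

lemma sumG_eq_of_ple (g g' : List (List Int)) (hshp : Shp g g')
    (h1 : PLe g g') (h2 : PLe g' g) : SumG g = SumG g' :=
  le_antisymm (sumG_le_of_ple g g' hshp h1) (sumG_le_of_ple g' g (shp_symm hshp) h2)

-- ===== VERDICT (by name: the statement is the Claim_ definition above) =====
theorem set_safe_spec : Claim_equal_set_safe := by
  intro node cells _hdom hpre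
  unfold Spec_set_safe
  obtain ⟨hlen3, hne, hrows, hstart⟩ := hpre
  rcases node with _ | ⟨x0, node⟩; · simp at hlen3
  rcases node with _ | ⟨y0, node⟩; · simp at hlen3
  rcases node with _ | ⟨h0', node⟩; · simp at hlen3
  rcases node with _ | ⟨z, node⟩
  swap; · simp at hlen3
  rcases cells with _ | ⟨r0, rest⟩; · exact absurd rfl hne
  -- names for the grid and its parameters
  set O := r0 :: rest with hOdef
  set R : Int := (O.length : Int) with hRdef
  set C : Int := (r0.length : Int) with hCdef
  have hrows' : ∀ row ∈ O, r0.length ≤ row.length := by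
    intro row hrow
    have := hrows row hrow
    simpa [hOdef] using this
  have hO : GOK R C O := ⟨rfl, fun row hrow => by
    rw [hCdef]; exact_mod_cast hrows' row hrow⟩
  set M : Int := pvMax O with hMdef
  have hMle : pvLe M O := pvLe_max O
  have hphi0 : 0 ≤ pvPhi M O := pvPhi_nonneg M O hMle
  -- the start read succeeds
  simp only [List.headI, List.tail_cons, pvGetCellP_eq] at hstart
  rcases hh : pvGetCell O x0 y0 with _ | h0
  · rw [hh] at hstart; simp at hstart
  have hh0M : h0 ≤ M := pvLe_of_get M O x0 y0 h0 hMle hh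
  -- the shared seed: A's first pop = B's seed loop
  have hmap : ([((1 : Int), (0 : Int)), (-1, 0), (0, 1), (0, -1)].map
      (fun d => (x0 + d.1, y0 + d.2))) = Nbs (x0, y0) := by
    simp [Nbs, sub_eq_add_neg]
  have hfoldA := foldA_eq R C x0 y0 h0
    [((1 : Int), (0 : Int)), (-1, 0), (0, 1), (0, -1)] ([], O, 0) hO
  rw [hmap] at hfoldA
  have hQ := QSpec_fold R C h0 (Nbs (x0, y0)) O [] 0 hO
  have hproj := rlxq_proj R C h0 (Nbs (x0, y0)) [] O 0
  rcases hst : (Nbs (x0, y0)).foldl (rlxq R C h0) ([], O, 0) with ⟨q1, g1, r1⟩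
  rw [hst] at hQ hproj
  have hF := FSp_fold h0 M (Nbs (x0, y0)) O 0 hO hMle hh0M
  rw [← hproj] at hF
  obtain ⟨hgok1, hple1, app, happ, hrapp, hchg, hlapp⟩ := hQ
  simp only at hgok1 hple1 happ hrapp hchg hlapp
  obtain ⟨_, hshp1, _, hle1, hsum1, hphi1, hret1⟩ := hF
  simp only [List.nil_append] at happ
  subst happ
  -- invariants entering A's remaining loop
  have hq1 : ∀ t ∈ q1, Inb R C t ∧ vAt O t < vAt g1 t :=
    fun t ht => ⟨(hrapp t ht).2.1, (hrapp t ht).2.2⟩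
  have hexc1 : ∀ t : Int × Int, Inb R C t → vAt O t < vAt g1 t →
      CellOK R C g1 t ∨ t ∈ q1 := by
    intro t hinb hraised
    have hne' : vN g1 t.1.toNat t.2.toNat ≠ vN O t.1.toNat t.2.toNat := by
      have : vAt O t < vAt g1 t := hraised
      unfold vAt at this
      omega
    obtain ⟨u, hu, hu1, hu2⟩ := hchg _ _ hne'
    right
    have : u = t := phys_inj (hrapp u hu).2.1 hinb hu1 hu2
    exact this ▸ hu
  -- fuel bookkeeping
  have htoA : ((2 * pvPhi M O + 1).toNat : Int) = 2 * pvPhi M O + 1 :=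
    Int.toNat_of_nonneg (by omega)
  obtain ⟨fA, hfa⟩ := Nat.exists_eq_succ_of_ne_zero
    (n := (2 * pvPhi M O + 1).toNat) (by omega)
  have hfaI : (fA : Int) = 2 * pvPhi M O := by
    rw [hfa] at htoA
    push_cast at htoA
    omega
  have hfuelA : 2 * pvPhi M g1 + (q1.length : Int) ≤ (fA : Int) := by
    have hphi1' : pvPhi M g1 = pvPhi M O - (r1 - 0) := hphi1
    have hlapp' : (q1.length : Int) ≤ r1 - 0 := hlapp
    rw [hfaI, hphi1']
    omega
  obtain ⟨gA, hvalA, _, hshpA, _, hpleA, _, hrcA, hminA⟩ :=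
    loopA_main R C M O fA q1 g1 r1 hgok1 hO (shp_trans (shp_refl O) hshp1)
      hple1 hle1 hq1 hexc1 hfuelA
  -- B's sweep
  have htoB : ((pvPhi M O + 1).toNat : Int) = pvPhi M O + 1 :=
    Int.toNat_of_nonneg (by omega)
  have hfuelB : pvPhi M g1 < (((pvPhi M O + 1).toNat : Nat) : Int) := by
    have hphi1' : pvPhi M g1 = pvPhi M O - (r1 - 0) := hphi1
    have hret1' : (0 : Int) ≤ r1 - 0 := by
      have : (0 : Int) ≤ r1 := hret1
      omega
    rw [htoB, hphi1']
    omega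
  obtain ⟨gB, hvalB, hshpB, hpleB, hrcB, hminB⟩ :=
    sweep_main R C M O hO (pvPhi M O + 1).toNat g1 r1 hgok1
      (shp_trans (shp_refl O) hshp1) hple1 hle1 hfuelB
  -- the two fixed points coincide
  have hAB : PLe gA gB := hminA gB hpleB hrcB
  have hBA : PLe gB gA := hminB gA hpleA hrcA
  have hsumEq : SumG gA = SumG gB :=
    sumG_eq_of_ple gA gB (shp_trans (shp_symm hshpA) hshpB) hAB hBA
  -- evaluate both ports
  have hA : set_safe [x0, y0, h0'] O = pvLoopA R C (fA + 1) [(x0, y0)] O 0 := by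
    show pvLoopA ((O.length : Int)) ((r0.length : Int)) (2 * pvPhi (pvMax O) O + 1).toNat
        [(x0, y0)] O 0 = _
    rw [← hMdef, ← hRdef, ← hCdef, hfa]
  have hpop : pvLoopA R C (fA + 1) [(x0, y0)] O 0 = pvLoopA R C fA q1 g1 r1 := by
    show (match pvGetCell O x0 y0 with
      | none => (0 : Int)
      | some h =>
        match [((1 : Int), (0 : Int)), (-1, 0), (0, 1), (0, -1)].foldl
            (pvRelaxA R C x0 y0 h) ([], O, 0) with
        | (q', cells', ret') => pvLoopA R C fA q' cells' ret') = _
    rw [hh]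
    show (match [((1 : Int), (0 : Int)), (-1, 0), (0, 1), (0, -1)].foldl
        (pvRelaxA R C x0 y0 h0) ([], O, 0) with
      | (q', cells', ret') => pvLoopA R C fA q' cells' ret') = _
    rw [hfoldA, hst]
  have hB : set_safe_alt [x0, y0, h0'] O = pvSweepB R C O (pvPhi M O + 1).toNat g1 r1 := by
    have hmapid : O.map (fun row => row) = O := by simp
    show (match pvGetCellB O x0 y0 with
      | none => (0 : Int)
      | some hh0 =>
        match [(x0 + 1, y0), (x0 - 1, y0), (x0, y0 + 1), (x0, y0 - 1)].foldl
            (pvSeedB R C hh0) (O, 0) with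
        | (gg1, rr1) =>
          pvSweepB R C (O.map (fun row => row)) (pvPhiB (pvMaxB O) O + 1).toNat gg1 rr1) = _
    rw [pvGetCellB_eq, hh]
    have hseed : [(x0 + 1, y0), (x0 - 1, y0), (x0, y0 + 1), (x0, y0 - 1)].foldl
        (pvSeedB R C h0) (O, 0) = (g1, r1) := by
      have hnb : ([(x0 + 1, y0), (x0 - 1, y0), (x0, y0 + 1), (x0, y0 - 1)])
          = Nbs (x0, y0) := rfl
      rw [hnb, foldSeed_eq R C h0 (Nbs (x0, y0)) (O, 0) hO, ← hproj]
    show (match [(x0 + 1, y0), (x0 - 1, y0), (x0, y0 + 1), (x0, y0 - 1)].foldl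
        (pvSeedB R C h0) (O, 0) with
      | (gg1, rr1) =>
        pvSweepB R C (O.map (fun row => row)) (pvPhiB (pvMaxB O) O + 1).toNat gg1 rr1) = _
    rw [hseed, hmapid, pvPhiB_eq, pvMaxB_eq, ← hMdef]
  rw [hA, hpop, hvalA, hB, hvalB, hsumEq]
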